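-- pv_equiv track=rewrite | github.com/volcengine/mcp-server | server/mcp_server_vefaas_function/src/mcp_server_vefaas_function/vefaas_cli_sdk/detector.py | _ensure_supported_py_version
-- ===== SOURCE A (Python) =====
-- def _ensure_supported_py_version(version: str) -> str:
--     """Ensure supported Python version"""
--     supported = ["3.9", "3.10", "3.11", "3.12"]
--     if version in supported:
--         return version
--     # Try to match major version
--     for v in reversed(supported):
--         if version.startswith(v.split(".")[0]):
--             return v
--     return "3.12"
-- ===== SOURCE B (Python) =====
-- def _ensure_supported_py_version(version: str) -> str:
--     supported = ["3.9", "3.10", "3.11", "3.12"]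
--     return version if version in supported else "3.12"
-- ===== Notes on version B (the rewrite author's own statement) =====
-- stated objective: simpler
-- what changed: The reversed startswith-matching loop is removed: its test compares against the same major-version prefix for every candidate, so it can only return the first element of the reversed list, which equals the final fallthrough value; B is a single guarded expression with no loop.
import Mathlib
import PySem

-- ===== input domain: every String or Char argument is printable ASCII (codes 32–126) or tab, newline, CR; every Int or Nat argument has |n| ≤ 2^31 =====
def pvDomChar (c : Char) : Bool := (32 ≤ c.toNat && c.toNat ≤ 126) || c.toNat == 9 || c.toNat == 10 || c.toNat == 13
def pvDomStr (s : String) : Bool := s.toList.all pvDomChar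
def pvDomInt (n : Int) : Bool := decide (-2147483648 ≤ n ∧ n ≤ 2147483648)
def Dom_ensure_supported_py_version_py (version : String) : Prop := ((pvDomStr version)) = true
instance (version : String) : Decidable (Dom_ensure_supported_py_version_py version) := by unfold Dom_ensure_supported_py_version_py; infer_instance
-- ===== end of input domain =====

-- B replaces A's reversed startswith loop (whose condition is constant per input) by a single guarded expression; objective: simpler.
-- ===== PORT A =====
-- the 'for v in reversed(supported)' loop; v.split(".")[0] via PySem.Str.split? (sep ≠ ""; result is
-- never empty, so headD "" is exact for the [0] index)
def pvLoopA (version : String) : List String → String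
  | [] => "3.12"
  | v :: rest =>
    if PySem.Str.startswith version ((((PySem.Str.split? v ".").getD []).headD "")) then v
    else pvLoopA version rest

def ensure_supported_py_version_py (version : String) : String :=
  let supported := ["3.9", "3.10", "3.11", "3.12"]
  if version ∈ supported then version
  else pvLoopA version supported.reverse

-- ===== PORT B =====
def ensure_supported_py_version_py_alt (version : String) : String :=
  let supported := ["3.9", "3.10", "3.11", "3.12"]
  if version ∈ supported then version else "3.12"

-- ===== PRECONDITION & SPEC =====
def Spec_ensure_supported_py_version_py (version : String) (out : String) : Prop := out = ensure_supported_py_version_py_alt version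
instance (version : String) (out : String) : Decidable (Spec_ensure_supported_py_version_py version out) := by unfold Spec_ensure_supported_py_version_py; infer_instance

-- ===== CLAIM (what is proved, stated in full; the proofs are below) =====
def Claim_equal_ensure_supported_py_version_py : Prop := ∀ (version : String), Dom_ensure_supported_py_version_py version → Spec_ensure_supported_py_version_py version (ensure_supported_py_version_py version)

-- ===== LEMMAS AND PROOFS =====

-- ===== VERDICT (by name: the statement is the Claim_ definition above) =====
-- the loop always returns "3.12": each candidate's major prefix is "3", so the first test that fires
-- (if any) is on the head "3.12", and the fallthrough is "3.12" too
theorem pvLoopA_const (version : String) :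
    pvLoopA version (["3.9", "3.10", "3.11", "3.12"] : List String).reverse = "3.12" := by
  have h : ∀ v ∈ (["3.9", "3.10", "3.11", "3.12"] : List String),
      ((PySem.Str.split? v ".").getD []).headD "" = "3" := by decide
  simp only [List.reverse_cons, List.reverse_nil, List.nil_append, List.cons_append]
  simp only [pvLoopA, h _ (by decide : "3.12" ∈ (["3.9", "3.10", "3.11", "3.12"] : List String)),
    h _ (by decide : "3.11" ∈ (["3.9", "3.10", "3.11", "3.12"] : List String)),
    h _ (by decide : "3.10" ∈ (["3.9", "3.10", "3.11", "3.12"] : List String)),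
    h _ (by decide : "3.9" ∈ (["3.9", "3.10", "3.11", "3.12"] : List String))]
  split_ifs <;> rfl

theorem ensure_supported_py_version_py_spec : Claim_equal_ensure_supported_py_version_py := by
  intro version _
  unfold Spec_ensure_supported_py_version_py ensure_supported_py_version_py ensure_supported_py_version_py_alt
  simp only []
  split_ifs with h
  · rfl
  · exact pvLoopA_const version
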